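-- pv_equiv track=rewrite | github.com/meiameiameia/Cinderleaf | src/sdvmm/services/update_metadata.py | _dedupe_requirement_items
-- ===== SOURCE A (Python) =====
-- def _dedupe_requirement_items(items: list[str] | tuple[str, ...]) -> tuple[str, ...]:
--     deduped: dict[str, str] = {}
--     for raw_item in items:
--         item = str(raw_item).strip()
--         if not item:
--             continue
--         key = item.casefold()
--         if key not in deduped:
--             deduped[key] = item
--
--     return tuple(sorted(deduped.values(), key=str.casefold))
-- ===== SOURCE B (Python) =====
-- def _dedupe_requirement_items(items):
--     # Different decomposition: clean, stable-sort by casefold, then keep the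
--     # first item of each equal-casefold run (stability => first-seen representative).
--     cleaned = [item for item in (str(raw).strip() for raw in items) if item]
--     ordered = sorted(cleaned, key=str.casefold)
--     result = []
--     prev = None
--     for item in ordered:
--         key = item.casefold()
--         if key != prev:
--             result.append(item)
--             prev = key
--     return tuple(result)
-- ===== Notes on version B (the rewrite author's own statement) =====
-- stated objective: alternative
-- what changed: Replaces A's first-seen dict accumulation followed by a keyed sort with a different decomposition: strip/filter, one stable sort by casefold, then a single scan keeping the first item of each equal-casefold run.
import Mathlib
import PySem

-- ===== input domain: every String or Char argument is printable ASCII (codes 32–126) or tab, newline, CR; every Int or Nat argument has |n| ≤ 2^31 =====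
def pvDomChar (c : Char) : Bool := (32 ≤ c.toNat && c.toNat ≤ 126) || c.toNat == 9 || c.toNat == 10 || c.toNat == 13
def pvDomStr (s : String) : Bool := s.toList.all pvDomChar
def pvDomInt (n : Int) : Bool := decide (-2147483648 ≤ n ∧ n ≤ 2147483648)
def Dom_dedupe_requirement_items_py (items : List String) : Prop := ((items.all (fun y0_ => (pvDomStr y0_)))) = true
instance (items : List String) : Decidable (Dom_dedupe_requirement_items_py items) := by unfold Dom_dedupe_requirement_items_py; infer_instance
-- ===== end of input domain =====

-- B replaces A's first-seen dict accumulation with clean → stable sort by casefold → keep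
-- first of each equal-key run (alternative decomposition, same cost; casefold = lower on this ASCII domain).

-- ===== PORT A =====
def dedupe_requirement_items_py (items : List String) : List String :=
  let deduped : PySem.Dict String String :=
    items.foldl (fun d raw_item =>
      let item := PySem.Str.strip raw_item
      if item = "" then d
      else
        let key := PySem.Str.lower item  -- str.casefold: exact = lower on the ASCII domain
        if d.contains key then d else d.insert key item)
      PySem.Dict.empty
  PySem.List.sorted deduped.values (fun s => PySem.Str.lower s)

-- ===== PORT B =====
def dedupe_requirement_items_py_alt (items : List String) : List String :=
  let cleaned := (items.map (fun raw => PySem.Str.strip raw)).filter (fun item => item ≠ "")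
  let ordered := PySem.List.sorted cleaned (fun s => PySem.Str.lower s)
  (ordered.foldl (fun (st : List String × Option String) item =>
      let key := PySem.Str.lower item
      if some key ≠ st.2 then (st.1 ++ [item], some key) else st)
    ([], none)).1

-- ===== PRECONDITION & SPEC =====
def Spec_dedupe_requirement_items_py (items : List String) (out : List String) : Prop := out = dedupe_requirement_items_py_alt items
instance (items : List String) (out : List String) : Decidable (Spec_dedupe_requirement_items_py items out) := by unfold Spec_dedupe_requirement_items_py; infer_instance

-- ===== CLAIM (what is proved, stated in full; the proofs are below) =====
def Claim_equal_dedupe_requirement_items_py : Prop := ∀ (items : List String), Dom_dedupe_requirement_items_py items → Spec_dedupe_requirement_items_py items (dedupe_requirement_items_py items)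

-- ===== LEMMAS AND PROOFS =====

-- the casefold key
def pvK (s : String) : String := PySem.Str.lower s

-- B's run-collapsing loop, in recursive form
def pvUniq (prev : Option String) : List String → List String
  | [] => []
  | x :: xs =>
      if some (pvK x) ≠ prev then x :: pvUniq (some (pvK x)) xs else pvUniq prev xs

-- A's first-seen representatives, as a plain list fold
def pvRepStep (acc : List String) (x : String) : List String :=
  if pvK x ∈ acc.map pvK then acc else acc ++ [x]

def pvReps (l : List String) : List String := l.foldl pvRepStep []

-- B's foldl equals pvUniq
theorem pvUniq_foldl (l : List String) (acc : List String) (prev : Option String) :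
    (l.foldl (fun (st : List String × Option String) item =>
        let key := PySem.Str.lower item
        if some key ≠ st.2 then (st.1 ++ [item], some key) else st)
      (acc, prev)).1 = acc ++ pvUniq prev l := by
  induction l generalizing acc prev with
  | nil => simp [pvUniq]
  | cons x xs ih =>
      rw [List.foldl_cons]
      by_cases h : some (PySem.Str.lower x) = prev
      · have hstep : (let key := PySem.Str.lower x;
            if some key ≠ (acc, prev).2 then ((acc, prev).1 ++ [x], some key) else (acc, prev))
            = ((acc, prev) : List String × Option String) := by simp [h]
        rw [hstep, ih]
        simp [pvUniq, pvK, h]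
      · have hstep : (let key := PySem.Str.lower x;
            if some key ≠ (acc, prev).2 then ((acc, prev).1 ++ [x], some key) else (acc, prev))
            = ((acc ++ [x], some (PySem.Str.lower x)) : List String × Option String) := by simp [h]
        rw [hstep, ih]
        simp [pvUniq, pvK, h]

-- A's raw loop equals the cleaned loop
theorem pvA_clean (l : List String) (d : PySem.Dict String String) :
    l.foldl (fun d raw_item =>
      let item := PySem.Str.strip raw_item
      if item = "" then d
      else
        let key := PySem.Str.lower item
        if d.contains key then d else d.insert key item) d
    = ((l.map (fun raw => PySem.Str.strip raw)).filter (fun item => item ≠ "")).foldl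
        (fun d item =>
          if d.contains (pvK item) then d else d.insert (pvK item) item) d := by
  induction l generalizing d with
  | nil => rfl
  | cons x xs ih =>
      simp only [List.foldl_cons, List.map_cons, List.filter_cons]
      by_cases h : PySem.Str.strip x = ""
      · simp [h, ih]
      · simp [h, ih, pvK]

-- the dict loop's values are pvReps, keys stay values.map pvK
theorem pvA_values (l : List String) (d : PySem.Dict String String)
    (hk : d.keys = d.values.map pvK) :
    (l.foldl (fun d item =>
        if d.contains (pvK item) then d else d.insert (pvK item) item) d).values
      = l.foldl pvRepStep d.values := by
  induction l generalizing d with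
  | nil => rfl
  | cons x xs ih =>
      rw [List.foldl_cons, List.foldl_cons]
      have hc : d.contains (pvK x) = decide (pvK x ∈ d.values.map pvK) := by
        rw [PySem.Dict.contains_eq_decide_mem_keys, hk]
      by_cases hm : pvK x ∈ d.values.map pvK
      · have hc' : d.contains (pvK x) = true := by rw [hc]; exact decide_eq_true hm
        rw [if_pos hc']
        have hrs : pvRepStep d.values x = d.values := by
          simp only [pvRepStep]; rw [if_pos hm]
        rw [hrs, ih d hk]
      · have hc' : ¬ d.contains (pvK x) = true := by
          rw [hc]; simp [hm]
        rw [if_neg hc']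
        have hcf : d.contains (pvK x) = false := by
          simpa using hc'
        have hins := PySem.Dict.items_insert_of_not_contains d x hcf
        have hvals : (d.insert (pvK x) x).values = d.values ++ [x] := by
          simp [PySem.Dict.values, hins]
        have hkeys : (d.insert (pvK x) x).keys = (d.insert (pvK x) x).values.map pvK := by
          simp only [PySem.Dict.keys, PySem.Dict.values, hins, List.map_append]
          simp only [PySem.Dict.keys, PySem.Dict.values] at hk
          simp [hk]
        have hrs : pvRepStep d.values x = d.values ++ [x] := by
          simp only [pvRepStep]; rw [if_neg hm]
        rw [hrs, ih _ hkeys, hvals]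

-- keys of pvReps: same keys as the input list
theorem pvReps_keys (l : List String) (κ : String) :
    κ ∈ (pvReps l).map pvK ↔ κ ∈ l.map pvK := by
  induction l using List.reverseRecOn with
  | nil => simp [pvReps]
  | append_singleton L x ih =>
      unfold pvReps at *
      rw [List.foldl_append]
      simp only [List.foldl_cons, List.foldl_nil, pvRepStep]
      by_cases h : pvK x ∈ (L.foldl pvRepStep []).map pvK
      · simp only [h, if_true, List.map_append, List.mem_append, List.map_cons,
          List.map_nil, List.mem_singleton]
        constructor
        · intro hκ; exact Or.inl (ih.mp hκ)
        · rintro (hκ | hκ)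
          · exact ih.mpr hκ
          · subst hκ; exact h
      · simp only [h, if_false, List.map_append, List.mem_append, List.map_cons,
          List.map_nil, List.mem_singleton, ih]
  -- strict-increase of pvUniq on a ≤-sorted list

theorem pvUniq_pairwise (l : List String) (prev : Option String)
    (hl : l.Pairwise (fun a b => pvK a ≤ pvK b))
    (hprev : ∀ p, prev = some p → ∀ y ∈ l, p ≤ pvK y) :
    (pvUniq prev l).Pairwise (fun a b => pvK a < pvK b) ∧
      ∀ y ∈ pvUniq prev l, ∀ p, prev = some p → p < pvK y := by
  induction l generalizing prev with
  | nil => simp [pvUniq]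
  | cons x xs ih =>
      have hx := (List.pairwise_cons.mp hl).1
      have hxs := (List.pairwise_cons.mp hl).2
      by_cases h : some (pvK x) = prev
      · have hres : pvUniq prev (x :: xs) = pvUniq prev xs := by
          simp [pvUniq, h]
        rw [hres]
        refine ih prev hxs ?_
        intro p hp y hy
        exact hprev p hp y (List.mem_cons_of_mem _ hy)
      · have hres : pvUniq prev (x :: xs) = x :: pvUniq (some (pvK x)) xs := by
          simp [pvUniq, h]
        rw [hres]
        have ih' := ih (some (pvK x)) hxs (by
          intro p hp y hy
          cases hp
          exact hx y hy)
        constructor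
        · refine List.pairwise_cons.mpr ⟨?_, ih'.1⟩
          intro y hy
          exact ih'.2 y hy (pvK x) rfl
        · intro y hy p hp
          rcases List.mem_cons.mp hy with hy | hy
          · subst hy
            have hle := hprev p hp y (List.mem_cons_self ..)
            have hne : p ≠ pvK y := by
              intro he; exact h (by rw [hp, he])
            exact lt_of_le_of_ne hle hne
          · have hlt := ih'.2 y hy (pvK x) rfl
            exact lt_of_le_of_lt (hprev p hp x (List.mem_cons_self ..)) hlt

-- pvUniq prev vs pvUniq none when prev is below everything in l
theorem pvUniq_none_of_lt (l : List String) (p : String)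
    (h : ∀ y ∈ l, p < pvK y) : pvUniq (some p) l = pvUniq none l := by
  cases l with
  | nil => rfl
  | cons x xs =>
      have : pvK x ≠ p := (ne_of_gt (h x (List.mem_cons_self ..)))
      simp [pvUniq, this]

-- the key insertBy lemma: inserting x into a ≤-sorted S
theorem pvUniq_insertBy (x : String) (S : List String) (prev : Option String)
    (hS : S.Pairwise (fun a b => pvK a ≤ pvK b))
    (hlb : ∀ p, prev = some p → p ≤ pvK x ∧ ∀ y ∈ S, p ≤ pvK y) :
    ((pvK x ∈ S.map pvK ∨ prev = some (pvK x)) →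
        pvUniq prev (PySem.List.insertBy (fun a b => decide (pvK a < pvK b)) x S) = pvUniq prev S) ∧
    (¬ (pvK x ∈ S.map pvK ∨ prev = some (pvK x)) →
        (pvUniq prev (PySem.List.insertBy (fun a b => decide (pvK a < pvK b)) x S)).Perm
          (x :: pvUniq prev S)) := by
  induction S generalizing prev with
  | nil =>
      constructor
      · rintro (hm | hm)
        · simp at hm
        · simp [PySem.List.insertBy, pvUniq, hm]
      · intro hm
        have hne : some (pvK x) ≠ prev := fun h => hm (Or.inr h.symm)
        simp [PySem.List.insertBy, pvUniq, hne]
  | cons y ys ih =>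
      have hy := (List.pairwise_cons.mp hS).1
      have hys := (List.pairwise_cons.mp hS).2
      by_cases hbef : pvK x < pvK y
      · -- x goes in front: x :: y :: ys
        have hins : PySem.List.insertBy (fun a b => decide (pvK a < pvK b)) x (y :: ys)
            = x :: y :: ys := by simp [PySem.List.insertBy, hbef]
        have hnot : pvK x ∉ (y :: ys).map pvK := by
          simp only [List.map_cons, List.mem_cons, not_or]
          refine ⟨ne_of_lt hbef, ?_⟩
          intro hmem
          rcases List.mem_map.mp hmem with ⟨z, hz, hzk⟩
          exact absurd (hzk ▸ hy z hz) (not_le.mpr hbef)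
        constructor
        · rintro (hm | hm)
          · exact absurd hm hnot
          · rw [hins]
            simp [pvUniq, hm]
        · intro hm
          have hne : some (pvK x) ≠ prev := fun he => hm (Or.inr he.symm)
          rw [hins]
          have h1 : pvUniq prev (x :: y :: ys) = x :: pvUniq (some (pvK x)) (y :: ys) := by
            simp [pvUniq, hne]
          rw [h1]
          have hlt : ∀ z ∈ y :: ys, pvK x < pvK z := by
            intro z hz
            rcases List.mem_cons.mp hz with hz | hz
            · subst hz; exact hbef
            · exact lt_of_lt_of_le hbef (hy z hz)
          rw [pvUniq_none_of_lt _ _ hlt]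
          rcases prev with _ | p
          · exact List.Perm.refl _
          · have hple := (hlb p rfl).1
            have hpne : p ≠ pvK x := fun he => hm (Or.inr (congrArg some he))
            have hplt : ∀ z ∈ y :: ys, p < pvK z := fun z hz =>
              lt_trans (lt_of_le_of_ne hple hpne) (hlt z hz)
            rw [pvUniq_none_of_lt _ _ hplt]
      · -- x goes after y: y :: insertBy x ys
        have hyx : pvK y ≤ pvK x := le_of_not_gt hbef
        have hins : PySem.List.insertBy (fun a b => decide (pvK a < pvK b)) x (y :: ys)
            = y :: PySem.List.insertBy (fun a b => decide (pvK a < pvK b)) x ys := by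
          simp [PySem.List.insertBy, hbef]
        rw [hins]
        by_cases hprev : prev = some (pvK y)
        · -- y is dropped on both sides
          have hskip : ∀ (t : List String), pvUniq prev (y :: t) = pvUniq prev t := by
            intro t; simp [pvUniq, hprev]
          rw [hskip, hskip]
          have ih' := ih prev hys (by
            intro p hp
            exact ⟨(hlb p hp).1, fun z hz => (hlb p hp).2 z (List.mem_cons_of_mem _ hz)⟩)
          constructor
          · rintro (hm | hm)
            · rcases List.mem_map.mp hm with ⟨z, hz, hzk⟩
              rcases List.mem_cons.mp hz with hz | hz
              · subst hz
                exact ih'.1 (Or.inr (by rw [hprev, hzk]))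
              · exact ih'.1 (Or.inl (hzk ▸ List.mem_map_of_mem hz))
            · exact ih'.1 (Or.inr hm)
          · intro hm
            refine ih'.2 ?_
            rintro (hm' | hm')
            · exact hm (Or.inl (by simp only [List.map_cons, List.mem_cons]; exact Or.inr hm'))
            · exact hm (Or.inr hm')
        · -- y is kept on both sides; recurse with prev := some (pvK y)
          have hkeep : ∀ (t : List String), pvUniq prev (y :: t) = y :: pvUniq (some (pvK y)) t := by
            intro t
            have hne : some (pvK y) ≠ prev := fun h => hprev h.symm
            simp [pvUniq, hne]
          rw [hkeep, hkeep]
          have ih' := ih (some (pvK y)) hys (by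
            intro p hp
            cases hp
            exact ⟨hyx, hy⟩)
          constructor
          · rintro (hm | hm)
            · rcases List.mem_map.mp hm with ⟨z, hz, hzk⟩
              rcases List.mem_cons.mp hz with hz | hz
              · subst hz
                rw [ih'.1 (Or.inr (by rw [hzk]))]
              · rw [ih'.1 (Or.inl (hzk ▸ List.mem_map_of_mem hz))]
            · -- prev = some (pvK x): forces pvK x = pvK y via the lower bound
              have hple := (hlb (pvK x) hm).2 y (List.mem_cons_self ..)
              have hxy : pvK x = pvK y := le_antisymm hple hyx
              exact absurd (hm.trans (congrArg some hxy)) hprev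
          · intro hm
            have hperm := ih'.2 (by
              rintro (hm' | hm')
              · exact hm (Or.inl (by simp only [List.map_cons, List.mem_cons]; exact Or.inr hm'))
              · have hxy : pvK x = pvK y := by
                  injection hm' with h'; exact h'.symm
                exact hm (Or.inl (by simp [hxy])))
            exact (hperm.cons y).trans (List.Perm.swap x y _)

-- pvReps on an appended element
theorem pvReps_append (L : List String) (x : String) :
    pvReps (L ++ [x]) = if pvK x ∈ (pvReps L).map pvK then pvReps L else pvReps L ++ [x] := by
  unfold pvReps
  rw [List.foldl_append]
  simp [pvRepStep]

-- main permutation lemma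
theorem pvUniq_perm_reps (L : List String) :
    (pvUniq none (PySem.List.sorted L (fun s => PySem.Str.lower s))).Perm (pvReps L) := by
  induction L using List.reverseRecOn with
  | nil => simp [pvReps, PySem.List.sorted, pvUniq]
  | append_singleton L x ih =>
      have hsorted : PySem.List.sorted (L ++ [x]) (fun s => PySem.Str.lower s)
          = PySem.List.insertBy (fun a b => decide (pvK a < pvK b)) x
              (PySem.List.sorted L (fun s => PySem.Str.lower s)) := by
        rw [PySem.List.sorted_eq_foldl_insertBy, PySem.List.sorted_eq_foldl_insertBy,
          List.foldl_append]
        rfl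
      have hS : (PySem.List.sorted L (fun s => PySem.Str.lower s)).Pairwise
          (fun a b => pvK a ≤ pvK b) := PySem.List.sorted_pairwise L _
      have hmemiff : pvK x ∈ (PySem.List.sorted L (fun s => PySem.Str.lower s)).map pvK
          ↔ pvK x ∈ L.map pvK :=
        ((PySem.List.sorted_perm L (fun s => PySem.Str.lower s) false).map pvK).mem_iff
      have hW := pvUniq_insertBy x (PySem.List.sorted L (fun s => PySem.Str.lower s)) none
        hS (by intro p hp; cases hp)
      rw [hsorted]
      by_cases hmem : pvK x ∈ L.map pvK
      · rw [hW.1 (Or.inl (hmemiff.mpr hmem))]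
        rw [pvReps_append]
        rw [if_pos ((pvReps_keys L (pvK x)).mpr hmem)]
        exact ih
      · have hperm := hW.2 (by
          rintro (hm | hm)
          · exact hmem (hmemiff.mp hm)
          · cases hm)
        rw [pvReps_append]
        rw [if_neg (fun hmm => hmem ((pvReps_keys L (pvK x)).mp hmm))]
        exact hperm.trans ((ih.cons x).trans (List.perm_append_singleton x (pvReps L)).symm)

-- ===== VERDICT (by name: the statement is the Claim_ definition above) =====
theorem dedupe_requirement_items_py_spec : Claim_equal_dedupe_requirement_items_py := by
  intro items _
  unfold Spec_dedupe_requirement_items_py dedupe_requirement_items_py dedupe_requirement_items_py_alt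
  rw [pvA_clean]
  dsimp only
  rw [pvA_values _ PySem.Dict.empty rfl]
  rw [pvUniq_foldl]
  have hpair := pvUniq_pairwise
      (PySem.List.sorted ((items.map (fun raw => PySem.Str.strip raw)).filter (fun item => item ≠ ""))
        (fun s => PySem.Str.lower s)) none
      (PySem.List.sorted_pairwise _ _) (by intro p hp; cases hp)
  have hmain := PySem.List.sorted_eq_of_perm_of_pairwise_lt
      (pvReps ((items.map (fun raw => PySem.Str.strip raw)).filter (fun item => item ≠ "")))
      (pvUniq none (PySem.List.sorted ((items.map (fun raw => PySem.Str.strip raw)).filter (fun item => item ≠ ""))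
        (fun s => PySem.Str.lower s)))
      pvK
      (pvUniq_perm_reps _) hpair.1
  simpa [pvReps] using hmain
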